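-- pv_equiv track=rewrite | github.com/tiger965/AI-auto | debug_tests/fix_all_python.py | fix_missing_pass
-- ===== SOURCE A (Python) =====
-- def fix_missing_pass(source):
--     """修复缺少pass语句的空代码块"""
--     lines = source.split("\n")
--     fixed_lines = []
--     i = 0
--
--     while i < len(lines):
--         line = lines[i]
--         fixed_lines.append(line)
--
--         # 检查以冒号结尾的行
--         if line.strip().endswith(":"):
--             # 获取当前行的缩进
--             current_indent = len(line) - len(line.lstrip())
--             expected_indent = current_indent + 4  # 预期的子块缩进
--
--             # 检查下一行
--             if i + 1 < len(lines):
--                 next_line = lines[i + 1]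
--                 next_indent = len(next_line) - len(next_line.lstrip())
--
--                 # 如果下一行缩进不够或是空行，添加pass
--                 if next_indent < expected_indent or not next_line.strip():
--                     indent_str = " " * expected_indent
--                     fixed_lines.append(f"{indent_str}pass")
--             else:
--                 # 文件结束，添加pass
--                 indent_str = " " * (current_indent + 4)
--                 fixed_lines.append(f"{indent_str}pass")
--
--         i += 1
--
--     return "\n".join(fixed_lines)
-- ===== SOURCE B (Python) =====
-- def _passes_between(line, nxt):
--     """pass lines required between `line` and its successor `nxt` (None at end of file)."""
--     if not line.strip().endswith(":"):
--         return []
--     e = len(line) - len(line.lstrip()) + 4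
--     if nxt is None or len(nxt) - len(nxt.lstrip()) < e or not nxt.strip():
--         return [" " * e + "pass"]
--     return []
--
--
-- def fix_missing_pass(source):
--     """修复缺少pass语句的空代码块 — reversed scan building the result back-to-front."""
--     out = []
--     nxt = None
--     for line in reversed(source.split("\n")):
--         out = [line] + _passes_between(line, nxt) + out
--         nxt = line
--     return "\n".join(out)
-- ===== Notes on version B (the rewrite author's own statement) =====
-- stated objective: alternative
-- what changed: B scans the lines in reverse and builds the result back-to-front by prepending each line plus the pass lines computed by a pure helper from the line and its already-seen successor, eliminating A's index arithmetic, lines[i+1] look-ahead and separate end-of-file branch.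
import Mathlib
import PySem

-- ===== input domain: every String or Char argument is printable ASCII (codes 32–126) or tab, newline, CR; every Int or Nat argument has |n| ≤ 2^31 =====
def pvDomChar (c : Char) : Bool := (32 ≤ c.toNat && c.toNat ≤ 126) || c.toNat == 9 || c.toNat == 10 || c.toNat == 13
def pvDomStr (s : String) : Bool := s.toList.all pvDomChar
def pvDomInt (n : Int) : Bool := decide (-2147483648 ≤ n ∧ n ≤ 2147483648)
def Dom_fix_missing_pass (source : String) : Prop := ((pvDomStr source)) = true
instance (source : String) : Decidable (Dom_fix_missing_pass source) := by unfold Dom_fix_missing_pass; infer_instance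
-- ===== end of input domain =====

-- B replaces A's forward index loop with lines[i+1] look-ahead and a separate end-of-file
-- branch by a reversed scan over the lines that builds the result back-to-front, prepending
-- each line plus the pass lines a pure helper computes from the already-seen successor
-- (alternative decomposition, same behaviour).

-- ===== PORT A =====
-- A's while-loop over indices i with look-ahead at lines[i+1]; ported as structural
-- recursion where the tail's head is lines[i+1] (the current line plus the remaining lines
-- are exactly the loop state).
def fixA_go : List (List Char) → List (List Char)
  | [] => []
  | line :: rest =>
    if PySem.Chars.endswith (PySem.Chars.strip line) [':'] then
      let currentIndent := line.length - (PySem.Chars.lstrip line).length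
      let expectedIndent := currentIndent + 4
      match rest with
      | nextLine :: _ =>
        let nextIndent := nextLine.length - (PySem.Chars.lstrip nextLine).length
        if nextIndent < expectedIndent ∨ (PySem.Chars.strip nextLine) = [] then
          line :: (List.replicate expectedIndent ' ' ++ ['p','a','s','s']) :: fixA_go rest
        else
          line :: fixA_go rest
      | [] =>
        line :: [List.replicate (currentIndent + 4) ' ' ++ ['p','a','s','s']]
    else
      line :: fixA_go rest

def fix_missing_pass (source : String) : String :=
  let lines := PySem.Chars.splitOn source.toList ['\n']
  String.ofList (PySem.Chars.join ['\n'] (fixA_go lines))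

-- ===== PORT B =====
-- Source B's helper _passes_between(line, nxt): the pass lines between a line and its successor.
def fixB_passes (line : List Char) (nxt : Option (List Char)) : List (List Char) :=
  if PySem.Chars.endswith (PySem.Chars.strip line) [':'] then
    let e := line.length - (PySem.Chars.lstrip line).length + 4
    if (match nxt with
        | none => true
        | some n => decide (n.length - (PySem.Chars.lstrip n).length < e)
                    || decide (PySem.Chars.strip n = []))
    then [List.replicate e ' ' ++ ['p','a','s','s']]
    else []
  else []

-- Source B's loop body: out = [line] + _passes_between(line, nxt) + out; nxt = line
def fixB_step (st : List (List Char) × Option (List Char)) (line : List Char) :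
    List (List Char) × Option (List Char) :=
  (line :: (fixB_passes line st.2 ++ st.1), some line)

def fix_missing_pass_alt (source : String) : String :=
  let lines := PySem.Chars.splitOn source.toList ['\n']
  let st := lines.reverse.foldl fixB_step ([], none)
  String.ofList (PySem.Chars.join ['\n'] st.1)

-- ===== PRECONDITION & SPEC =====
def Spec_fix_missing_pass (source : String) (out : String) : Prop := out = fix_missing_pass_alt source
instance (source : String) (out : String) : Decidable (Spec_fix_missing_pass source out) := by unfold Spec_fix_missing_pass; infer_instance

-- ===== CLAIM (what is proved, stated in full; the proofs are below) =====
def Claim_equal_fix_missing_pass : Prop := ∀ (source : String), Dom_fix_missing_pass source → Spec_fix_missing_pass source (fix_missing_pass source)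

-- ===== LEMMAS AND PROOFS =====

-- the successor of the head of a suffix whose overall successor is nxt
def succOf (rest : List (List Char)) (nxt : Option (List Char)) : Option (List Char) :=
  match rest with
  | [] => nxt
  | h :: _ => some h

-- common spec: each line followed by the pass lines determined by its successor;
-- nxt is the successor of the LAST line of the list (none at end of file).
def Sspec : List (List Char) → Option (List Char) → List (List Char)
  | [], _ => []
  | l :: rest, nxt => l :: (fixB_passes l (succOf rest nxt) ++ Sspec rest nxt)

theorem fixA_cons (l : List Char) (rest : List (List Char)) :
    fixA_go (l :: rest) =
      (if PySem.Chars.endswith (PySem.Chars.strip l) [':'] then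
        match rest with
        | nextLine :: _ =>
          if nextLine.length - (PySem.Chars.lstrip nextLine).length <
                l.length - (PySem.Chars.lstrip l).length + 4 ∨
              (PySem.Chars.strip nextLine) = [] then
            l :: (List.replicate (l.length - (PySem.Chars.lstrip l).length + 4) ' '
                    ++ ['p','a','s','s']) :: fixA_go rest
          else
            l :: fixA_go rest
        | [] => l :: [List.replicate (l.length - (PySem.Chars.lstrip l).length + 4) ' '
                    ++ ['p','a','s','s']]
      else l :: fixA_go rest) := rfl

theorem fixA_eq_Sspec (ls : List (List Char)) : fixA_go ls = Sspec ls none := by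
  induction ls with
  | nil => rfl
  | cons l rest ih =>
    rw [fixA_cons]
    by_cases hcol : PySem.Chars.endswith (PySem.Chars.strip l) [':'] = true
    · cases rest with
      | nil =>
        simp [Sspec, succOf, fixB_passes, hcol]
      | cons nxt r' =>
        rw [ih]
        by_cases hc : (nxt.length - (PySem.Chars.lstrip nxt).length <
              l.length - (PySem.Chars.lstrip l).length + 4) ∨ (PySem.Chars.strip nxt = [])
        · rcases hc with hc | hc <;>
            simp [Sspec, succOf, fixB_passes, hcol, hc]
        · rw [not_or, Nat.not_lt] at hc
          simp [Sspec, succOf, fixB_passes, hcol, hc.2,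
                Nat.not_lt.mpr hc.1]
    · simp only [Bool.not_eq_true] at hcol
      simp [Sspec, fixB_passes, hcol, ih]

theorem fixB_fold (ls : List (List Char)) (tailOut : List (List Char))
    (nxt0 : Option (List Char)) :
    ls.reverse.foldl fixB_step (tailOut, nxt0) = (Sspec ls nxt0 ++ tailOut, succOf ls nxt0) := by
  induction ls generalizing tailOut nxt0 with
  | nil => simp [Sspec, succOf]
  | cons l rest ih =>
    rw [List.reverse_cons, List.foldl_append, ih]
    simp [fixB_step, Sspec, succOf]

-- ===== VERDICT (by name: the statement is the Claim_ definition above) =====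
theorem fix_missing_pass_spec : Claim_equal_fix_missing_pass := by
  intro source _
  show fix_missing_pass source = fix_missing_pass_alt source
  simp only [fix_missing_pass, fix_missing_pass_alt]
  rw [fixB_fold, fixA_eq_Sspec]
  simp
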